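-- pv_equiv track=rewrite | github.com/jan3zk/forced_alignment | add_grapheme_tier.py | merge_phoneme_sequences
-- ===== SOURCE A (Python) =====
-- def merge_phoneme_sequences(phonemes):
--     """Merge phoneme sequences based on known patterns"""
--     merged_phonemes = []
--     i = 0
--
--     while i < len(phonemes):
--         # Handle common special cases
--         if i < len(phonemes) - 1 and phonemes[i] == "v" and phonemes[i+1] == "@":
--             merged_phonemes.append("v@")
--             i += 2
--         elif i < len(phonemes) - 1 and phonemes[i] == "r" and phonemes[i+1] == "@":
--             merged_phonemes.append("r@")
--             i += 2
--         elif i < len(phonemes) - 1 and phonemes[i] == "@" and phonemes[i+1] == "r":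
--             merged_phonemes.append("@r")
--             i += 2
--         elif i < len(phonemes) - 1 and phonemes[i] == "l" and phonemes[i+1] == "@":
--             merged_phonemes.append("l@")
--             i += 2
--         else:
--             merged_phonemes.append(phonemes[i])
--             i += 1
--
--     return merged_phonemes
-- ===== SOURCE B (Python) =====
-- PAIRS = {("v", "@"), ("r", "@"), ("@", "r"), ("l", "@")}
--
--
-- def merge_phoneme_sequences(phonemes):
--     """Merge phoneme sequences based on known patterns"""
--     # Stage 1: greedy merge-start marks, one bit per adjacent pair.
--     marks = []
--     prev = False
--     for pair in zip(phonemes, phonemes[1:]):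
--         prev = not prev and pair in PAIRS
--         marks.append(prev)
--     # Stage 2: emit tokens, skipping positions covered by a preceding merge.
--     out = []
--     for ph, nxt, mark, covered in zip(phonemes, phonemes[1:] + [""],
--                                       marks + [False], [False] + marks):
--         if not covered:
--             out.append(ph + nxt if mark else ph)
--     return out
-- ===== Notes on version B (the rewrite author's own statement) =====
-- stated objective: alternative
-- what changed: Replaces A's single index-advancing while loop (elif chain, i += 1 or 2) by two staged passes: a first pass over zip(phonemes, phonemes[1:]) computing a greedy merge-start bit per adjacent pair via the recurrence mark = not prev_mark and pair in PAIRS, then a second pass over a four-way zip that skips covered positions and emits concatenated pairs where marked.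
import Mathlib
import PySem

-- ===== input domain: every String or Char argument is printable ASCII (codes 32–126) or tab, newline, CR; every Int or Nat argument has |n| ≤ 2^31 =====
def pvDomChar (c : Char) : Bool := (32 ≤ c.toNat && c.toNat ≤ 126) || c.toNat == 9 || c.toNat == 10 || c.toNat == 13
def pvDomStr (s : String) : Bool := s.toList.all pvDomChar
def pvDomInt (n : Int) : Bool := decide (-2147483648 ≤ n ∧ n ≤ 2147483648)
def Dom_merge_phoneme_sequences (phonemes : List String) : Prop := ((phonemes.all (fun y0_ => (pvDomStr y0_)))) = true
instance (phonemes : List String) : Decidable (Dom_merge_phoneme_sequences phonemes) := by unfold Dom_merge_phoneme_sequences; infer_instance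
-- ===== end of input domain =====

-- B replaces A's index-advancing while loop by two staged passes: a mark pass computing one
-- greedy merge-start bit per adjacent pair, then an emit pass over zipped lists (objective: alternative).

-- ===== PORT A =====
-- while loop with index i; fuel = remaining iterations (≤ length), a totality guard only
def mergeA_loop (phonemes : List String) : Nat → Nat → List String → List String
  | 0, _, acc => acc
  | fuel+1, i, acc =>
    if i < phonemes.length then
      if i < phonemes.length - 1 ∧ phonemes.getD i "" = "v" ∧ phonemes.getD (i+1) "" = "@" then
        mergeA_loop phonemes fuel (i+2) (acc ++ ["v@"])
      else if i < phonemes.length - 1 ∧ phonemes.getD i "" = "r" ∧ phonemes.getD (i+1) "" = "@" then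
        mergeA_loop phonemes fuel (i+2) (acc ++ ["r@"])
      else if i < phonemes.length - 1 ∧ phonemes.getD i "" = "@" ∧ phonemes.getD (i+1) "" = "r" then
        mergeA_loop phonemes fuel (i+2) (acc ++ ["@r"])
      else if i < phonemes.length - 1 ∧ phonemes.getD i "" = "l" ∧ phonemes.getD (i+1) "" = "@" then
        mergeA_loop phonemes fuel (i+2) (acc ++ ["l@"])
      else
        mergeA_loop phonemes fuel (i+1) (acc ++ [phonemes.getD i ""])
    else acc

def merge_phoneme_sequences (phonemes : List String) : List String :=
  mergeA_loop phonemes phonemes.length 0 []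

-- ===== PORT B =====
def PAIRS : PySem.Set (String × String) :=
  PySem.Set.ofList [("v", "@"), ("r", "@"), ("@", "r"), ("l", "@")]

-- stage 1: for pair in zip(phonemes, phonemes[1:]): prev = not prev and pair in PAIRS; marks.append(prev)
-- stage 2: for ph,nxt,mark,covered in zip(phonemes, phonemes[1:]+[""], marks+[False], [False]+marks): …
def merge_phoneme_sequences_alt (phonemes : List String) : List String :=
  let marks :=
    ((phonemes.zip (phonemes.drop 1)).foldl
      (fun st pair =>
        let prev := !st.1 && PySem.Set.contains PAIRS pair
        (prev, st.2 ++ [prev]))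
      (false, ([] : List Bool))).2
  ((phonemes.zip (phonemes.drop 1 ++ [""])).zip ((marks ++ [false]).zip (false :: marks))).foldl
    (fun out x =>
      if !x.2.2 then out ++ [if x.2.1 then x.1.1 ++ x.1.2 else x.1.1] else out)
    []

-- ===== PRECONDITION & SPEC =====
def Spec_merge_phoneme_sequences (phonemes : List String) (out : List String) : Prop := out = merge_phoneme_sequences_alt phonemes
instance (phonemes : List String) (out : List String) : Decidable (Spec_merge_phoneme_sequences phonemes out) := by unfold Spec_merge_phoneme_sequences; infer_instance

-- ===== CLAIM (what is proved, stated in full; the proofs are below) =====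
def Claim_equal_merge_phoneme_sequences : Prop := ∀ (phonemes : List String), Dom_merge_phoneme_sequences phonemes → Spec_merge_phoneme_sequences phonemes (merge_phoneme_sequences phonemes)

-- ===== LEMMAS AND PROOFS =====

-- common reference function: structural greedy merge on the list
def fA : List String → List String
  | [] => []
  | [x] => [x]
  | x :: y :: rest =>
    if x = "v" ∧ y = "@" then "v@" :: fA rest
    else if x = "r" ∧ y = "@" then "r@" :: fA rest
    else if x = "@" ∧ y = "r" then "@r" :: fA rest
    else if x = "l" ∧ y = "@" then "l@" :: fA rest
    else x :: fA (y :: rest)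

lemma mergeA_loop_eq_fA (phonemes : List String) :
    ∀ fuel i acc, phonemes.length - i ≤ fuel →
      mergeA_loop phonemes fuel i acc = acc ++ fA (phonemes.drop i) := by
  intro fuel
  induction fuel with
  | zero =>
    intro i acc h
    rw [show mergeA_loop phonemes 0 i acc = acc from rfl,
      List.drop_of_length_le (by omega), fA, List.append_nil]
  | succ fuel ih =>
    intro i acc h
    by_cases hi : i < phonemes.length
    · have hdi : phonemes.drop i = phonemes[i] :: phonemes.drop (i+1) :=
        List.drop_eq_getElem_cons hi
      have hgi : phonemes.getD i "" = phonemes[i] := List.getD_eq_getElem _ _ hi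
      by_cases hi1 : i + 1 < phonemes.length
      · have hdi1 : phonemes.drop (i+1) = phonemes[i+1] :: phonemes.drop (i+2) :=
          List.drop_eq_getElem_cons hi1
        have hgi1 : phonemes.getD (i+1) "" = phonemes[i+1] := List.getD_eq_getElem _ _ hi1
        have hlt : i < phonemes.length - 1 := by omega
        rw [mergeA_loop, if_pos hi, hgi, hgi1, hdi, hdi1, fA]
        by_cases c1 : phonemes[i] = "v" ∧ phonemes[i+1] = "@"
        · rw [if_pos ⟨hlt, c1.1, c1.2⟩, if_pos c1, ih (i+2) _ (by omega)]
          simp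
        · rw [if_neg (fun hh => c1 ⟨hh.2.1, hh.2.2⟩), if_neg c1]
          by_cases c2 : phonemes[i] = "r" ∧ phonemes[i+1] = "@"
          · rw [if_pos ⟨hlt, c2.1, c2.2⟩, if_pos c2, ih (i+2) _ (by omega)]
            simp
          · rw [if_neg (fun hh => c2 ⟨hh.2.1, hh.2.2⟩), if_neg c2]
            by_cases c3 : phonemes[i] = "@" ∧ phonemes[i+1] = "r"
            · rw [if_pos ⟨hlt, c3.1, c3.2⟩, if_pos c3, ih (i+2) _ (by omega)]
              simp
            · rw [if_neg (fun hh => c3 ⟨hh.2.1, hh.2.2⟩), if_neg c3]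
              by_cases c4 : phonemes[i] = "l" ∧ phonemes[i+1] = "@"
              · rw [if_pos ⟨hlt, c4.1, c4.2⟩, if_pos c4, ih (i+2) _ (by omega)]
                simp
              · rw [if_neg (fun hh => c4 ⟨hh.2.1, hh.2.2⟩), if_neg c4,
                  ih (i+1) _ (by omega), hdi1]
                simp
      · have hlast : ¬ i < phonemes.length - 1 := by omega
        have hd1 : phonemes.drop (i+1) = ([] : List String) := List.drop_of_length_le (by omega)
        rw [mergeA_loop, if_pos hi,
          if_neg (by simp [hlast]), if_neg (by simp [hlast]),
          if_neg (by simp [hlast]), if_neg (by simp [hlast]),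
          ih (i+1) _ (by omega), hd1, hdi, hd1, hgi, fA]
        simp [fA]
    · rw [mergeA_loop, if_neg hi, List.drop_of_length_le (by omega), fA, List.append_nil]

-- structural form of B's mark pass
def marksGo : Bool → List (String × String) → List Bool
  | _, [] => []
  | prev, p :: ps =>
    let m := !prev && PySem.Set.contains PAIRS p
    m :: marksGo m ps

lemma foldl_marks (ps : List (String × String)) :
    ∀ prev acc,
      (ps.foldl
        (fun st pair =>
          let m := !st.1 && PySem.Set.contains PAIRS pair
          (m, st.2 ++ [m]))
        (prev, acc)).2 = acc ++ marksGo prev ps := by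
  induction ps with
  | nil => intro prev acc; simp [marksGo]
  | cons p ps ih =>
    intro prev acc
    simp only [List.foldl, marksGo, ih, List.append_assoc, List.singleton_append]

-- structural form of B's emit pass
def emitGo : List ((String × String) × (Bool × Bool)) → List String
  | [] => []
  | x :: rest =>
    if !x.2.2 then (if x.2.1 then x.1.1 ++ x.1.2 else x.1.1) :: emitGo rest else emitGo rest

lemma foldl_emit (l : List ((String × String) × (Bool × Bool))) :
    ∀ acc,
      l.foldl
        (fun out x =>
          if !x.2.2 then out ++ [if x.2.1 then x.1.1 ++ x.1.2 else x.1.1] else out)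
        acc = acc ++ emitGo l := by
  induction l with
  | nil => intro acc; simp [emitGo]
  | cons x rest ih =>
    intro acc
    rw [List.foldl_cons, ih]
    obtain ⟨pn, m, cov⟩ := x
    cases cov <;> simp [emitGo]

-- reference form of the zipped emit
def Gref : Bool → List String → List String
  | _, [] => []
  | prev, [x] => if prev then [] else [x]
  | prev, x :: y :: rest =>
    let m := !prev && PySem.Set.contains PAIRS (x, y)
    (if prev then [] else [if m then x ++ y else x]) ++ Gref m (y :: rest)

lemma Gref_cons2 (prev : Bool) (x y : String) (rest : List String) :
    Gref prev (x :: y :: rest) =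
      (if prev then []
       else [if !prev && PySem.Set.contains PAIRS (x, y) then x ++ y else x]) ++
        Gref (!prev && PySem.Set.contains PAIRS (x, y)) (y :: rest) := by
  simp [Gref]

lemma mem_PAIRS (x y : String) :
    (x, y) ∈ PAIRS ↔
      (x = "v" ∧ y = "@") ∨ (x = "r" ∧ y = "@") ∨ (x = "@" ∧ y = "r") ∨ (x = "l" ∧ y = "@") := by
  simp [PAIRS, PySem.Set.mem_ofList, Prod.ext_iff]

lemma emit_zip_eq_Gref :
    ∀ (xs : List String) (prev : Bool),
      emitGo ((xs.zip (xs.drop 1 ++ [""])).zip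
        ((marksGo prev (xs.zip (xs.drop 1)) ++ [false]).zip
          (prev :: marksGo prev (xs.zip (xs.drop 1))))) = Gref prev xs := by
  intro xs
  induction xs with
  | nil => intro prev; simp [emitGo, Gref, marksGo]
  | cons x xs ih =>
    intro prev
    cases xs with
    | nil =>
      cases prev <;> simp [emitGo, Gref, marksGo]
    | cons y rest =>
      simp only [List.drop_succ_cons, List.drop_zero] at ih ⊢
      rw [show (x :: y :: rest).zip (y :: rest) = (x, y) :: (y :: rest).zip rest from by simp,
        show (x :: y :: rest).zip ((y :: rest) ++ [""]) =
          (x, y) :: (y :: rest).zip (rest ++ [""]) from by simp,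
        marksGo, Gref_cons2]
      rw [show ∀ (m : Bool) (ms : List Bool),
            ((m :: ms) ++ [false]).zip (prev :: m :: ms) =
              (m, prev) :: ((ms ++ [false]).zip (m :: ms)) from fun m ms => by simp,
          List.zip_cons_cons, emitGo]
      cases prev <;> simp [ih]

lemma Gref_true_cons (y : String) (rest : List String) :
    Gref true (y :: rest) = Gref false rest := by
  cases rest with
  | nil => rfl
  | cons r rr => simp [Gref]

lemma Gref_eq_fA : ∀ (xs : List String), Gref false xs = fA xs := by
  intro xs
  induction xs using fA.induct with
  | case1 => rfl
  | case2 x => rfl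
  | case3 x y rest h ih =>
    obtain ⟨hx, hy⟩ := h; subst hx; subst hy
    simp [Gref_cons2, fA, Gref_true_cons, ih,
      show (("v", "@") : String × String) ∈ PAIRS from by decide]
  | case4 x y rest h1 h ih =>
    obtain ⟨hx, hy⟩ := h; subst hx; subst hy
    simp [Gref_cons2, fA, Gref_true_cons, ih,
      show (("r", "@") : String × String) ∈ PAIRS from by decide]
  | case5 x y rest h1 h2 h ih =>
    obtain ⟨hx, hy⟩ := h; subst hx; subst hy
    simp [Gref_cons2, fA, Gref_true_cons, ih,
      show (("@", "r") : String × String) ∈ PAIRS from by decide]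
  | case6 x y rest h1 h2 h3 h ih =>
    obtain ⟨hx, hy⟩ := h; subst hx; subst hy
    simp [Gref_cons2, fA, Gref_true_cons, ih,
      show (("l", "@") : String × String) ∈ PAIRS from by decide]
  | case7 x y rest h1 h2 h3 h4 ih =>
    have hm : (x, y) ∉ PAIRS := by
      rw [mem_PAIRS]
      rintro (h | h | h | h)
      · exact h1 h
      · exact h2 h
      · exact h3 h
      · exact h4 h
    simp [Gref_cons2, fA, hm, h1, h2, h3, h4, ih]

-- ===== VERDICT (by name: the statement is the Claim_ definition above) =====
theorem merge_phoneme_sequences_spec : Claim_equal_merge_phoneme_sequences := by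
  intro phonemes _
  unfold Spec_merge_phoneme_sequences merge_phoneme_sequences merge_phoneme_sequences_alt
  rw [mergeA_loop_eq_fA phonemes phonemes.length 0 [] (by omega)]
  simp only [List.drop_zero, List.nil_append]
  rw [foldl_marks, List.nil_append, foldl_emit, List.nil_append,
    emit_zip_eq_Gref, Gref_eq_fA]
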